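-- pv_equiv track=rewrite | github.com/wwong-bc/BOJ | 프로그래머스/lv3/12938. 최고의 집합/최고의 집합.py | solution
-- ===== SOURCE A (Python) =====
-- def solution(n, s):
--     if n > s:
--         return [-1]
--     else:
--         q = s // n
--         r = s % n
--         answer = [q for _ in range(n)]
--         for i in range(r):
--             answer[i] += 1
--         return sorted(answer)
-- ===== SOURCE B (Python) =====
-- def solution(n, s):
--     if n > s:
--         return [-1]
--     answer = []
--     rem = s
--     k = n
--     while k > 0:
--         x = rem // k
--         answer.append(x)
--         rem -= x
--         k -= 1
--     return answer
-- ===== Notes on version B (the rewrite author's own statement) =====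
-- stated objective: alternative
-- what changed: B builds the answer greedily in one pass: with k parts left it emits x = rem // k (the correct next smallest element) and updates rem -= x, so A's [q]*n list, increment loop over the first r slots and final sort all disappear.
import Mathlib
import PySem

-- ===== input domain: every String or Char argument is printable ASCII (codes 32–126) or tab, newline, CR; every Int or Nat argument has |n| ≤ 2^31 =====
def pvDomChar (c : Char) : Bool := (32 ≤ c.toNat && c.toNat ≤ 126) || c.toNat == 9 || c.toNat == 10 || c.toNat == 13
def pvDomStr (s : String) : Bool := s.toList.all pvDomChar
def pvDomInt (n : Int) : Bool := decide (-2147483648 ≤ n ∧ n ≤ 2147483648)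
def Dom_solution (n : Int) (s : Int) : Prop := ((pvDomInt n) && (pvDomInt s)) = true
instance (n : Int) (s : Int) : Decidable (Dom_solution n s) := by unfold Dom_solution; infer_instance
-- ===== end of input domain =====

-- B builds the answer by a greedy recursion (next element = rem // k), replacing A's increment loop and final sort (alternative).


-- ===== PORT A =====
def solution (n : Int) (s : Int) : List Int :=
  if n > s then [-1]
  else
    let q := PySem.Int.floordiv s n
    let r := PySem.Int.mod s n
    let answer := (PySem.List.pyRange 0 n 1).map (fun _ => q)
    let answer := (PySem.List.pyRange 0 r 1).foldl
      (fun acc i => acc.set i.toNat (PySem.List.pyGetD acc i 0 + 1)) answer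
    PySem.List.sorted answer (fun x => x) false

-- ===== PORT B =====
-- B's while loop: while k > 0, append x = rem // k, rem -= x, k -= 1.
def greedyLoop (k : Int) (rem : Int) (answer : List Int) : List Int :=
  if k > 0 then
    let x := PySem.Int.floordiv rem k
    greedyLoop (k - 1) (rem - x) (answer ++ [x])
  else answer
termination_by k.toNat
decreasing_by omega

def solution_alt (n : Int) (s : Int) : List Int :=
  if n > s then [-1] else greedyLoop n s []

-- ===== PRECONDITION & SPEC =====
-- Pre_ excludes only n = 0 with 0 ≤ s, where Python's s // n raises ZeroDivisionError.
def Pre_solution (n : Int) (s : Int) : Prop := n = 0 → s < 0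
instance (n : Int) (s : Int) : Decidable (Pre_solution n s) := by unfold Pre_solution; infer_instance
def pvWitness_solution : Int × Int := (3, 7)
def Spec_solution (n : Int) (s : Int) (out : List Int) : Prop := out = solution_alt n s
instance (n : Int) (s : Int) (out : List Int) : Decidable (Spec_solution n s out) := by unfold Spec_solution; infer_instance

-- ===== CLAIM (what is proved, stated in full; the proofs are below) =====
def Claim_equal_solution : Prop := ∀ (n : Int) (s : Int), Dom_solution n s → Pre_solution n s → Spec_solution n s (solution n s)

-- ===== LEMMAS AND PROOFS =====

-- A's increment loop: after setting the first k slots, the list is k copies of q+1 followed by N-k copies of q.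
lemma foldl_set_inc (q : Int) (N : Nat) :
    ∀ k : Nat, k ≤ N →
      (PySem.List.pyRange 0 (k : Int) 1).foldl
        (fun acc i => acc.set i.toNat (PySem.List.pyGetD acc i 0 + 1)) (List.replicate N q)
      = List.replicate k (q + 1) ++ List.replicate (N - k) q := by
  intro k
  induction k with
  | zero =>
    intro _
    simp [PySem.List.pyRange_one_eq_nil (le_refl (0 : Int))]
  | succ k ih =>
    intro hk
    have hk' : k ≤ N := Nat.le_of_succ_le hk
    have hcast : ((k + 1 : Nat) : Int) = (k : Int) + 1 := by push_cast; ring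
    rw [hcast, PySem.List.pyRange_one_succ_right (by positivity), List.foldl_append, ih hk']
    simp only [List.foldl_cons, List.foldl_nil]
    have hlen : (List.replicate k (q + 1)).length = k := List.length_replicate
    have hmid : PySem.List.pyGetD (List.replicate k (q + 1) ++ List.replicate (N - k) q) (k : Int) 0 = q := by
      rw [PySem.List.pyGetD_of_nonneg, Int.toNat_natCast, List.getD_eq_getElem?_getD,
          List.getElem?_append_right (by simp)]
      have h0 : 0 < N - k := by omega
      simp [h0]
      positivity
    rw [hmid]
    have hNk : N - k = (N - (k + 1)) + 1 := by omega
    rw [Int.toNat_natCast, List.set_append, hlen]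
    simp only [lt_irrefl, Nat.sub_self]
    rw [hNk, List.replicate_succ, List.set_cons_zero]
    rw [List.replicate_succ' (n := k)]
    simp

lemma replicate_le_pairwise (a b : Nat) (q : Int) :
    (List.replicate a q ++ List.replicate b (q + 1)).Pairwise (· ≤ ·) := by
  refine List.pairwise_append.mpr ⟨?_, ?_, ?_⟩
  · exact List.pairwise_replicate.mpr (Or.inr (le_refl q))
  · exact List.pairwise_replicate.mpr (Or.inr (le_refl (q + 1)))
  · intro x hx y hy
    rw [List.eq_of_mem_replicate hx, List.eq_of_mem_replicate hy]
    omega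

-- B's greedy loop with k = m parts remaining, rem = m*q + r with 0 ≤ r ≤ m,
-- appends m - r copies of q followed by r copies of q + 1 to the accumulator.
lemma greedyLoop_closed :
    ∀ (m : Nat) (q r : Int) (acc : List Int), 0 ≤ r → r ≤ m →
      greedyLoop (m : Int) ((m : Int) * q + r) acc
        = acc ++ (List.replicate (m - r.toNat) q ++ List.replicate r.toNat (q + 1)) := by
  intro m
  induction m with
  | zero =>
    intro q r acc hr0 hrm
    have : r = 0 := le_antisymm (by exact_mod_cast hrm) hr0
    subst this
    simp [greedyLoop]
  | succ j ih =>
    intro q r acc hr0 hrm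
    have hkpos : ((j + 1 : Nat) : Int) > 0 := by push_cast; omega
    rw [greedyLoop, if_pos hkpos]
    by_cases hcase : r ≤ (j : Int)
    · -- quotient is q; remainder state becomes j*q + r
      have hx : PySem.Int.floordiv (((j + 1 : Nat) : Int) * q + r) ((j + 1 : Nat) : Int) = q := by
        rw [PySem.Int.floordiv_eq_iff_of_pos (by push_cast; omega)]
        push_cast
        constructor <;> nlinarith
      simp only [hx]
      have harg : ((j + 1 : Nat) : Int) * q + r - q = (j : Int) * q + r := by push_cast; ring
      have harg2 : ((j + 1 : Nat) : Int) - 1 = (j : Int) := by push_cast; ring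
      rw [harg, harg2, ih q r (acc ++ [q]) hr0 hcase]
      have hsub : (j + 1) - r.toNat = (j - r.toNat) + 1 := by omega
      rw [hsub, List.replicate_succ]
      simp
    · -- r = j + 1: quotient is q + 1; remainder state becomes j*(q+1)
      have hreq : r = (j : Int) + 1 := by push_cast at hrm; omega
      subst hreq
      have hx : PySem.Int.floordiv (((j + 1 : Nat) : Int) * q + ((j : Int) + 1)) ((j + 1 : Nat) : Int) = q + 1 := by
        rw [PySem.Int.floordiv_eq_iff_of_pos (by push_cast; omega)]
        push_cast
        constructor <;> nlinarith
      simp only [hx]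
      have harg : ((j + 1 : Nat) : Int) * q + ((j : Int) + 1) - (q + 1) = (j : Int) * (q + 1) + 0 := by
        push_cast; ring
      have harg2 : ((j + 1 : Nat) : Int) - 1 = (j : Int) := by push_cast; ring
      rw [harg, harg2, ih (q + 1) 0 (acc ++ [q + 1]) le_rfl (by positivity)]
      have h1 : ((j : Int) + 1).toNat = j + 1 := by omega
      have h2 : (0 : Int).toNat = 0 := rfl
      rw [h1, h2]
      simp [List.replicate_succ]

-- ===== VERDICT (by name: the statement is the Claim_ definition above) =====
theorem solution_spec : Claim_equal_solution := by
  intro n s _ hpre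
  unfold Spec_solution solution solution_alt
  by_cases hns : n > s
  · simp [hns]
  · simp only [if_neg hns]
    have hle : n ≤ s := le_of_not_gt hns
    set q := PySem.Int.floordiv s n with hq
    set r := PySem.Int.mod s n with hr
    rcases lt_trichotomy n 0 with hneg | hzero | hpos
    · -- n < 0 : both sides are []
      have hb := PySem.Int.mod_neg_bounds (a := s) (b := n) hneg
      have h1 : PySem.List.pyRange 0 n 1 = [] := PySem.List.pyRange_one_eq_nil (le_of_lt hneg)
      have h2 : PySem.List.pyRange 0 r 1 = [] := PySem.List.pyRange_one_eq_nil hb.2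
      have h3 : greedyLoop n s [] = [] := by rw [greedyLoop, if_neg (by omega)]
      simp [h1, h2, h3, PySem.List.sorted]
    · exact absurd (hpre hzero) (by omega)
    · -- n > 0 : the generic case
      have hr0 : 0 ≤ r := PySem.Int.mod_nonneg s hpos
      have hrn : r < n := PySem.Int.mod_lt s hpos
      -- A side: sorted list equals (n-r) copies of q then r copies of q+1
      have hinit : (PySem.List.pyRange 0 n 1).map (fun _ => q) = List.replicate n.toNat q := by
        rw [List.map_const']
        simp [PySem.List.length_pyRange_one]
      have hcast : ((r.toNat : Nat) : Int) = r := Int.toNat_of_nonneg hr0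
      have hfold := foldl_set_inc q n.toNat r.toNat (by omega)
      rw [hcast] at hfold
      rw [hinit, hfold]
      have hperm : (List.replicate (n.toNat - r.toNat) q ++ List.replicate r.toNat (q + 1)).Perm
          (List.replicate r.toNat (q + 1) ++ List.replicate (n.toNat - r.toNat) q) :=
        List.perm_append_comm
      have hA := PySem.List.sorted_id_eq_of_perm_of_pairwise _ _ hperm
        (replicate_le_pairwise _ _ q)
      rw [hA]
      -- B side: greedy recursion equals the same closed form
      have hs : s = (n.toNat : Int) * q + r := by
        have := PySem.Int.floordiv_mul_add_mod s n
        rw [← hq, ← hr] at this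
        rw [Int.toNat_of_nonneg (le_of_lt hpos)]
        linarith [this]
      have hB := greedyLoop_closed n.toNat q r [] hr0 (by omega)
      rw [← hs, Int.toNat_of_nonneg (le_of_lt hpos), List.nil_append] at hB
      rw [hB]
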